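-- pv_equiv track=rewrite | github.com/PeopleAndService/AlgorithmStudy | yoongyeong/by_python/Programmers/Level1/4주차_직업군 추천하기.py | solution
-- ===== SOURCE A (Python) =====
-- def solution(table, languages, preference):
--     scores = []
--     for t in table:
--         t = t.split()
--         score = 0
--         for language, prefer in zip(languages, preference):
--             if language in t:
--                 score += (6 - t.index(language)) * prefer
--         scores.append((-score, t[0]))
--     return sorted(scores)[0][1]
-- ===== SOURCE B (Python) =====
-- def solution(table, languages, preference):
--     pref = {}
--     for l, p in zip(languages, preference):
--         pref[l] = pref.get(l, 0) + p
--     best = None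
--     for row in table:
--         words = row.split()
--         score = 0
--         seen = set()
--         for i, w in enumerate(words):
--             if w not in seen:
--                 seen.add(w)
--                 score += (6 - i) * pref.get(w, 0)
--         cand = (-score, words[0])
--         if best is None or cand < best:
--             best = cand
--     return best[1]
-- ===== Notes on version B (the rewrite author's own statement) =====
-- stated objective: faster
-- what changed: Inverts the inner loop: one summed preference dictionary is built once, each row is scored by a single enumerate pass over its words with a seen-set (no per-language list.index scans), and the answer is kept as a streaming running-best instead of materializing and sorting a scores list.
import Mathlib
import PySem

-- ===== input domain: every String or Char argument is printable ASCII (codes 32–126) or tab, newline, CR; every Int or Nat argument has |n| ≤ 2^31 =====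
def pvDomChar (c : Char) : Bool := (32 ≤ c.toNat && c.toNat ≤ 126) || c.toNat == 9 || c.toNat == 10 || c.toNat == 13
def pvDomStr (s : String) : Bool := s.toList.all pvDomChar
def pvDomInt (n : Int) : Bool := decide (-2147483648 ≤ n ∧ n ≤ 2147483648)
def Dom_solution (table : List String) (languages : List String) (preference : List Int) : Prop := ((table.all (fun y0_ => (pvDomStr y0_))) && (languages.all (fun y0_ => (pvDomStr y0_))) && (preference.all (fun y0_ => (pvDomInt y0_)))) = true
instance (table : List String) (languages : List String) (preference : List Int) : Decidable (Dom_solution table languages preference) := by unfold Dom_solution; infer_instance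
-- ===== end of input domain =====

-- B inverts the inner loop: one summed preference dictionary is built once, each row is scored by a
-- single enumerate pass over its words with a seen-set (no list.index scans), and the answer is the
-- running best candidate instead of sorting a materialized scores list.

-- ===== PORT A =====
def solution (table : List String) (languages : List String) (preference : List Int) : String :=
  let scores : List (Int × String) := table.foldl (fun scores t0 =>
    let t := PySem.Str.split₀ t0
    let score : Int := (languages.zip preference).foldl (fun score lp =>
      if lp.1 ∈ t then score + (6 - (((PySem.List.index? t lp.1).getD 0 : Nat) : Int)) * lp.2
      else score) 0
    scores ++ [(-score, (PySem.List.pyGet? t 0).getD "")]) []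
  ((PySem.List.pyGet? (PySem.List.sorted2 scores (fun p => p.1) (fun p => p.2)) 0).getD (0, "")).2

-- ===== PORT B =====
def solution_alt (table : List String) (languages : List String) (preference : List Int) : String :=
  let pref : PySem.Dict String Int := (languages.zip preference).foldl
    (fun d lp => d.insert lp.1 (d.getD lp.1 0 + lp.2)) PySem.Dict.empty
  let best : Option (Int × String) := table.foldl (fun best row =>
    let words := PySem.Str.split₀ row
    let st := (PySem.List.enumerate words 0).foldl (fun st iw =>
      if PySem.Set.contains st.2 iw.2 then st
      else (st.1 + (6 - iw.1) * pref.getD iw.2 0, PySem.Set.add st.2 iw.2))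
      ((0 : Int), (PySem.Set.empty : PySem.Set String))
    let cand : Int × String := (-st.1, (PySem.List.pyGet? words 0).getD "")
    match best with
    | none => some cand
    | some b => if cand.1 < b.1 ∨ (cand.1 = b.1 ∧ cand.2 < b.2) then some cand else some b) none
  (best.getD (0, "")).2

-- ===== PRECONDITION & SPEC =====
-- Pre_ excludes exactly the inputs on which A raises: an empty table (sorted(scores)[0] IndexError)
-- and a row with no words (t[0] IndexError).
def Pre_solution (table : List String) (languages : List String) (preference : List Int) : Prop :=
  table ≠ [] ∧ ∀ s ∈ table, PySem.Str.split₀ s ≠ []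
instance (table : List String) (languages : List String) (preference : List Int) : Decidable (Pre_solution table languages preference) := by unfold Pre_solution; infer_instance
def pvWitness_solution : List String × List String × List Int := (["python java", "java c"], ["java", "c"], [3, 2])

def Spec_solution (table : List String) (languages : List String) (preference : List Int) (out : String) : Prop := out = solution_alt table languages preference
instance (table : List String) (languages : List String) (preference : List Int) (out : String) : Decidable (Spec_solution table languages preference out) := by unfold Spec_solution; infer_instance

-- ===== CLAIM (what is proved, stated in full; the proofs are below) =====
def Claim_equal_solution : Prop := ∀ (table : List String) (languages : List String) (preference : List Int), Dom_solution table languages preference → Pre_solution table languages preference → Spec_solution table languages preference (solution table languages preference)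

-- ===== LEMMAS AND PROOFS =====

-- the summed preference dictionary B builds
def prefD (S : List (String × Int)) : PySem.Dict String Int :=
  S.foldl (fun d lp => d.insert lp.1 (d.getD lp.1 0 + lp.2)) PySem.Dict.empty

-- total preference of one word over the zipped (language, preference) pairs
def sumP (S : List (String × Int)) (w : String) : Int :=
  (S.map (fun lp => if lp.1 = w then lp.2 else 0)).sum

-- A's contribution of one (language, preference) pair
def cA (t : List String) (lp : String × Int) : Int :=
  match PySem.List.index? t lp.1 with
  | some k => (6 - (k : Int)) * lp.2
  | none => 0

-- B's seen-set recursion over the words of a row, abstracted from the fold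
def Tscore (pref : PySem.Dict String Int) : List String → Int → PySem.Set String → Int
  | [], _, _ => 0
  | w :: ws, i, seen =>
    if PySem.Set.contains seen w then Tscore pref ws (i + 1) seen
    else (6 - i) * pref.getD w 0 + Tscore pref ws (i + 1) (PySem.Set.add seen w)

def candA (languages : List String) (preference : List Int) (t0 : String) : Int × String :=
  let t := PySem.Str.split₀ t0
  let score : Int := (languages.zip preference).foldl (fun score lp =>
    if lp.1 ∈ t then score + (6 - (((PySem.List.index? t lp.1).getD 0 : Nat) : Int)) * lp.2
    else score) 0
  (-score, (PySem.List.pyGet? t 0).getD "")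

def candB (pref : PySem.Dict String Int) (row : String) : Int × String :=
  let words := PySem.Str.split₀ row
  let st := (PySem.List.enumerate words 0).foldl (fun st iw =>
    if PySem.Set.contains st.2 iw.2 then st
    else (st.1 + (6 - iw.1) * pref.getD iw.2 0, PySem.Set.add st.2 iw.2))
    ((0 : Int), (PySem.Set.empty : PySem.Set String))
  (-st.1, (PySem.List.pyGet? words 0).getD "")

theorem getD_prefD_fold (S : List (String × Int)) (d : PySem.Dict String Int) (w : String) :
    (S.foldl (fun d lp => d.insert lp.1 (d.getD lp.1 0 + lp.2)) d).getD w 0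
    = d.getD w 0 + sumP S w := by
  induction S generalizing d with
  | nil => simp [sumP]
  | cons lp S' ih =>
    simp only [List.foldl_cons]
    rw [ih, PySem.Dict.getD_insert]
    by_cases h : lp.1 = w
    · subst h; simp [sumP]; ring
    · have h' : w ≠ lp.1 := fun he => h he.symm
      simp [sumP, h, h']

theorem getD_prefD (S : List (String × Int)) (w : String) :
    (prefD S).getD w 0 = sumP S w := by
  unfold prefD; rw [getD_prefD_fold]; simp

theorem scoreA_eq_sum (t : List String) (S : List (String × Int)) :
    S.foldl (fun score lp =>
      if lp.1 ∈ t then score + (6 - (((PySem.List.index? t lp.1).getD 0 : Nat) : Int)) * lp.2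
      else score) 0 = (S.map (cA t)).sum := by
  have h : ∀ (acc : Int) (lp : String × Int), lp ∈ S →
      (if lp.1 ∈ t then acc + (6 - (((PySem.List.index? t lp.1).getD 0 : Nat) : Int)) * lp.2
       else acc) = acc + cA t lp := by
    intro acc lp _
    cases hidx : PySem.List.index? t lp.1 with
    | none =>
      have hmem : lp.1 ∉ t := (PySem.List.index?_eq_none_iff _ _).mp hidx
      simp only [cA]
      rw [hidx, if_neg hmem]
      simp
    | some k =>
      have hmem : lp.1 ∈ t := by
        rw [← PySem.List.index?_isSome_iff (xs := t) (v := lp.1), hidx]; rfl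
      simp only [cA]
      rw [hidx, if_pos hmem]
      simp
  rw [PySem.List.foldl_congr_mem _ _ _ _ h, PySem.List.foldl_add]
  simp

theorem fold_eq_Tscore (pref : PySem.Dict String Int) (ws : List String) (i : Int)
    (acc : Int) (seen : PySem.Set String) :
    ((PySem.List.enumerate ws i).foldl (fun st iw =>
      if PySem.Set.contains st.2 iw.2 then st
      else (st.1 + (6 - iw.1) * pref.getD iw.2 0, PySem.Set.add st.2 iw.2)) (acc, seen)).1
    = acc + Tscore pref ws i seen := by
  induction ws generalizing i acc seen with
  | nil => simp [PySem.List.enumerate_nil, Tscore]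
  | cons w ws' ih =>
    rw [PySem.List.enumerate_cons]
    simp only [List.foldl_cons]
    by_cases hc : PySem.Set.contains seen w
    · simp only [hc, if_true, Tscore, ih]
    · simp only [hc, if_false, Bool.false_eq_true, Tscore, ih]
      ring

theorem contains_notmem_false {s : PySem.Set String} {y : String} (h : y ∉ s) :
    PySem.Set.contains s y = false :=
  Bool.eq_false_iff.mpr (fun hc => h ((PySem.Set.contains_iff _ _).mp hc))

theorem contains_add_of_ne (s : PySem.Set String) (x y : String) (h : y ≠ x) :
    PySem.Set.contains (PySem.Set.add s x) y = PySem.Set.contains s y := by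
  cases hc : PySem.Set.contains s y with
  | true =>
    have hm : y ∈ s := (PySem.Set.contains_iff _ _).mp hc
    exact (PySem.Set.contains_iff _ _).mpr ((PySem.Set.mem_add _ _ _).mpr (Or.inl hm))
  | false =>
    have hm : y ∉ s := fun hmem => by rw [(PySem.Set.contains_iff _ _).mpr hmem] at hc; cases hc
    exact contains_notmem_false (fun hmem => by
      rcases (PySem.Set.mem_add _ _ _).mp hmem with h1 | h2
      · exact hm h1
      · exact h h2)

theorem sum_map_ite_mul (S : List (String × Int)) (w : String) (c : Int) :
    (S.map (fun lp => if lp.1 = w then c * lp.2 else 0)).sum = c * sumP S w := by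
  induction S with
  | nil => simp [sumP]
  | cons lp S' ih =>
    simp only [List.map_cons, List.sum_cons, ih, sumP, mul_add]
    by_cases h : lp.1 = w <;> simp [h]

theorem Tscore_eq_sum (S : List (String × Int)) (pref : PySem.Dict String Int)
    (hpref : ∀ w, pref.getD w 0 = sumP S w) (ws : List String) (i : Int)
    (seen : PySem.Set String) :
    Tscore pref ws i seen = (S.map (fun lp =>
      if PySem.Set.contains seen lp.1 then 0
      else match PySem.List.index? ws lp.1 with
           | some k => (6 - (i + (k : Int))) * lp.2
           | none => 0)).sum := by
  induction ws generalizing i seen with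
  | nil =>
    have h : ∀ lp ∈ S, (if PySem.Set.contains seen lp.1 then (0 : Int)
        else match PySem.List.index? ([] : List String) lp.1 with
             | some k => (6 - (i + (k : Int))) * lp.2
             | none => 0) = 0 := by
      intro lp _
      simp [PySem.List.index?_eq_idxOf?]
    rw [List.map_congr_left h]
    simp [Tscore]
  | cons w ws' ih =>
    by_cases hc : PySem.Set.contains seen w
    · simp only [Tscore, hc, if_true]
      rw [ih (i + 1) seen]
      apply congrArg
      apply List.map_congr_left
      intro lp _
      by_cases hcl : PySem.Set.contains seen lp.1 = true
      · rw [if_pos hcl, if_pos hcl]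
      · have hw : lp.1 ≠ w := fun he => hcl (he ▸ hc)
        have hw' : w ≠ lp.1 := fun he => hw he.symm
        rw [if_neg hcl, if_neg hcl, PySem.List.index?_cons_of_ne _ hw']
        cases hidx : PySem.List.index? ws' lp.1 with
        | none => rfl
        | some k =>
          simp only [Option.map_some]
          push_cast
          ring
    · simp only [Tscore, hc, if_false, Bool.false_eq_true]
      rw [ih (i + 1) (PySem.Set.add seen w), hpref w]
      have hpt : ∀ lp ∈ S, (if PySem.Set.contains seen lp.1 then (0 : Int)
          else match PySem.List.index? (w :: ws') lp.1 with
               | some k => (6 - (i + (k : Int))) * lp.2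
               | none => 0)
          = (if lp.1 = w then (6 - i) * lp.2 else 0)
            + (if PySem.Set.contains (PySem.Set.add seen w) lp.1 then 0
               else match PySem.List.index? ws' lp.1 with
                    | some k => (6 - ((i + 1) + (k : Int))) * lp.2
                    | none => 0) := by
        intro lp _
        by_cases hw : lp.1 = w
        · subst hw
          have hmem : lp.1 ∈ PySem.Set.add seen lp.1 :=
            (PySem.Set.mem_add _ _ _).mpr (Or.inr rfl)
          rw [PySem.List.index?_cons_self, if_neg hc,
            if_pos ((PySem.Set.contains_iff _ _).mpr hmem), if_pos rfl]
          push_cast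
          ring
        · have hw' : w ≠ lp.1 := fun he => hw he.symm
          rw [contains_add_of_ne seen w lp.1 hw, PySem.List.index?_cons_of_ne _ hw',
            if_neg hw]
          by_cases hcl : PySem.Set.contains seen lp.1 = true
          · rw [if_pos hcl, if_pos hcl]
            ring
          · rw [if_neg hcl, if_neg hcl]
            cases hidx : PySem.List.index? ws' lp.1 with
            | none => simp
            | some k =>
              simp only [Option.map_some]
              push_cast
              ring
      rw [List.map_congr_left hpt, PySem.List.sum_map_add_int, sum_map_ite_mul]

theorem candA_eq_candB (languages : List String) (preference : List Int) (t0 : String) :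
    candA languages preference t0 = candB (prefD (languages.zip preference)) t0 := by
  unfold candA candB
  have hscore :
      (languages.zip preference).foldl (fun score lp =>
        if lp.1 ∈ PySem.Str.split₀ t0 then
          score + (6 - (((PySem.List.index? (PySem.Str.split₀ t0) lp.1).getD 0 : Nat) : Int)) * lp.2
        else score) 0
      = ((PySem.List.enumerate (PySem.Str.split₀ t0) 0).foldl (fun st iw =>
          if PySem.Set.contains st.2 iw.2 then st
          else (st.1 + (6 - iw.1) * (prefD (languages.zip preference)).getD iw.2 0,
                PySem.Set.add st.2 iw.2))
          ((0 : Int), (PySem.Set.empty : PySem.Set String))).1 := by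
    rw [scoreA_eq_sum, fold_eq_Tscore,
      Tscore_eq_sum (languages.zip preference) _ (getD_prefD (languages.zip preference)) _ 0
        PySem.Set.empty]
    simp only [zero_add]
    apply congrArg
    apply List.map_congr_left
    intro lp _
    have hce : PySem.Set.contains (PySem.Set.empty : PySem.Set String) lp.1 = false :=
      contains_notmem_false (by simp [PySem.Set.empty])
    rw [hce]
    simp only [if_false, Bool.false_eq_true, cA]
  simp only []
  rw [hscore]

theorem head?_insertBy {α : Type} (before : α → α → Bool) (x : α) (l : List α) :
    (PySem.List.insertBy before x l).head? = some (match l.head? with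
      | none => x
      | some y => if before x y then x else y) := by
  cases l with
  | nil => rfl
  | cons y ys => by_cases h : before x y <;> simp [PySem.List.insertBy, h]

-- the streaming-minimum step, named so every occurrence uses one matcher
def lstep (acc : Option (Int × String)) (x : Int × String) : Option (Int × String) :=
  match acc with
  | none => some x
  | some m => if (decide (x.1 < m.1) || !decide (m.1 < x.1) && decide (x.2 < m.2)) = true then some x
              else some m

def ltb (a b : Int × String) : Bool :=
  decide (a.1 < b.1) || !decide (b.1 < a.1) && decide (a.2 < b.2)

theorem min2?_eq_foldl (ys : List (Int × String)) :
    PySem.List.min2? ys (fun p => p.1) (fun p => p.2) = ys.foldl lstep none := by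
  simp only [PySem.List.min2?]
  exact PySem.List.foldl_congr_mem _ _ _ _ (fun acc x _ => by cases acc <;> rfl)

theorem sorted2_eq_foldl (ys : List (Int × String)) :
    PySem.List.sorted2 ys (fun p => p.1) (fun p => p.2)
    = ys.foldl (fun acc x => PySem.List.insertBy ltb x acc) [] := by
  simp only [PySem.List.sorted2]
  exact PySem.List.foldl_congr_mem _ _ _ _ (fun acc x _ => by rfl)

theorem head?_sorted2_eq_min2? (xs : List (Int × String)) :
    (PySem.List.sorted2 xs (fun p => p.1) (fun p => p.2)).head?
    = PySem.List.min2? xs (fun p => p.1) (fun p => p.2) := by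
  rw [min2?_eq_foldl, sorted2_eq_foldl]
  induction xs using List.reverseRecOn with
  | nil => rfl
  | append_singleton xs x ih =>
    rw [List.foldl_append, List.foldl_append]
    simp only [List.foldl_cons, List.foldl_nil]
    rw [head?_insertBy, ih]
    generalize List.foldl lstep none xs = r
    cases r with
    | none => rfl
    | some m => exact apply_ite Option.some _ x m

theorem pyGet?_zero_head? {α : Type} (l : List α) : PySem.List.pyGet? l 0 = l.head? := by
  cases l <;> simp [PySem.List.pyGet?, PySem.List.pyIdx?]

-- B's streaming best over the table is the first lexicographic minimum of the candidate tuples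
theorem bestB_eq_min2? (pref : PySem.Dict String Int) (table : List String) :
    table.foldl (fun best row =>
        match best with
        | none => some (candB pref row)
        | some b => if (candB pref row).1 < b.1 ∨
            ((candB pref row).1 = b.1 ∧ (candB pref row).2 < b.2)
            then some (candB pref row) else some b) none
    = PySem.List.min2? (table.map (candB pref)) (fun p => p.1) (fun p => p.2) := by
  rw [PySem.List.min2?, List.foldl_map]
  apply PySem.List.foldl_congr_mem
  intro acc x _
  cases acc with
  | none => rfl
  | some b =>
    simp only []
    by_cases h1 : (candB pref x).1 < b.1 <;>
      by_cases h2 : b.1 < (candB pref x).1 <;>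
      by_cases h3 : (candB pref x).2 < b.2 <;>
      simp [h1, h2, h3] <;> omega

-- ===== VERDICT (by name: the statement is the Claim_ definition above) =====
theorem solution_spec : Claim_equal_solution := by
  intro table languages preference _ _
  unfold Spec_solution solution solution_alt
  show ((PySem.List.pyGet? (PySem.List.sorted2
      (table.foldl (fun scores t0 => scores ++ [candA languages preference t0]) [])
      (fun p => p.1) (fun p => p.2)) 0).getD (0, "")).2
    = ((table.foldl (fun best row =>
        match best with
        | none => some (candB (prefD (languages.zip preference)) row)
        | some b => if (candB (prefD (languages.zip preference)) row).1 < b.1 ∨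
            ((candB (prefD (languages.zip preference)) row).1 = b.1 ∧
             (candB (prefD (languages.zip preference)) row).2 < b.2)
            then some (candB (prefD (languages.zip preference)) row) else some b) none).getD
        (0, "")).2
  rw [PySem.List.foldl_append_singleton_eq_map, List.nil_append, bestB_eq_min2?,
    pyGet?_zero_head?, head?_sorted2_eq_min2?,
    List.map_congr_left (fun t0 _ => candA_eq_candB languages preference t0)]
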